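-- pv_equiv track=rewrite | github.com/onojk/geom_factor | prime_volume_driver.py | scan_rectangular_prisms
-- ===== SOURCE A (Python) =====
-- from math import isqrt
-- from typing import List, Tuple
--
-- def is_prime(n: int) -> bool:
--     if n <= 1:
--         return False
--     if n <= 3:
--         return True
--     if n % 2 == 0:
--         return n == 2
--     r = isqrt(n)
--     f = 3
--     while f <= r:
--         if n % f == 0:
--             return False
--         f += 2
--     return True
--
-- def primes_up_to(limit: int) -> List[int]:
--     return [n for n in range(2, limit + 1) if is_prime(n)]
--
-- def scan_rectangular_prisms(prime_limit: int, max_h: int, allow_one: bool) -> List[Tuple[int, int, int, int]]: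
--     """
--     Return list of (L, W, H, V) where L,W,H are in allowed set (primes up to prime_limit, plus 1 if allow_one)
--     and V = L*W*H is prime.
--     """
--     ps = primes_up_to(prime_limit)
--     dims = ([1] if allow_one else []) + ps
--
--     hits = []
--     for L in dims:
--         for W in dims:
--             for H in dims:
--                 if H > max_h:
--                     continue
--                 V = L * W * H
--                 if is_prime(V):
--                     hits.append((L, W, H, V))
--     return hits
-- ===== SOURCE B (Python) =====
-- from math import isqrt
-- from typing import List, Tuple
--
-- def _is_prime(n: int) -> bool:
--     return n >= 2 and all(n % d for d in range(2, isqrt(n) + 1))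
--
-- def scan_rectangular_prisms(prime_limit: int, max_h: int, allow_one: bool) -> List[Tuple[int, int, int, int]]:
--     # A product of three allowed dims is prime iff two dims are 1 and the third
--     # is prime; without 1 in the allowed set there are no hits at all.
--     if not allow_one:
--         return []
--     ps = [n for n in range(2, prime_limit + 1) if _is_prime(n)]
--     hits = [(1, 1, p, p) for p in ps if p <= max_h]
--     if max_h >= 1:
--         hits += [(1, p, 1, p) for p in ps]
--         hits += [(p, 1, 1, p) for p in ps]
--     return hits
-- ===== Notes on version B (the rewrite author's own statement) =====
-- stated objective: faster
-- what changed: Replaces the triple loop over all dims with trial division on every product by a direct closed-form enumeration: a product of three allowed dims is prime iff two of them are 1 and the third is a prime, so B emits the three hit families ((1,1,p,p), (1,p,1,p), (p,1,1,p)) straight from the prime list in A's output order.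
import Mathlib
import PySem

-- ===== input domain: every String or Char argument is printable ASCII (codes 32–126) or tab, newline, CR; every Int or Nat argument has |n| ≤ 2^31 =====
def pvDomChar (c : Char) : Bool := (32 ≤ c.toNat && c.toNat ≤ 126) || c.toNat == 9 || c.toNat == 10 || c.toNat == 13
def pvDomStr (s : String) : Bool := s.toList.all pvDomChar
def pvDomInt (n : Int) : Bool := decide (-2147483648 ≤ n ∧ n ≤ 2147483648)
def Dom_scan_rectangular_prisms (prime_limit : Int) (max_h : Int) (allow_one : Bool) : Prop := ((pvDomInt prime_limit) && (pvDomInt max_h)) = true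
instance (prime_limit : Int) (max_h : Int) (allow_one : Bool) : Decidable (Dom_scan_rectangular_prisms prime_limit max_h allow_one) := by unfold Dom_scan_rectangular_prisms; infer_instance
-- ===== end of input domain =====

-- B replaces A's triple loop over all dims (with a primality test on every product) by the
-- closed-form enumeration of the only possible hits — two dims 1, the third prime — emitted
-- in A's loop order; objective: faster (asymptotic).

-- math.isqrt(n); exact for n ≥ 0 (both programs only call it on n ≥ 0)
def pyIsqrt (n : Int) : Int := (Nat.sqrt n.toNat : Int)

-- ===== PORT A =====
-- the 'while f <= r' trial-division loop of is_prime
def isPrimeLoop (n r f : Int) : Bool :=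
  if h : f ≤ r then
    if PySem.Int.mod n f = 0 then false else isPrimeLoop n r (f + 2)
  else true
termination_by (r + 2 - f).toNat
decreasing_by omega

def is_prime (n : Int) : Bool :=
  if n ≤ 1 then false
  else if n ≤ 3 then true
  else if PySem.Int.mod n 2 = 0 then decide (n = 2)
  else isPrimeLoop n (pyIsqrt n) 3

def primes_up_to (limit : Int) : List Int :=
  (PySem.List.pyRange 2 (limit + 1) 1).filter (fun n => is_prime n)

def scan_rectangular_prisms (prime_limit : Int) (max_h : Int) (allow_one : Bool) : List (List Int) :=
  let ps := primes_up_to prime_limit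
  let dims := (if allow_one then [(1 : Int)] else []) ++ ps
  dims.foldl (fun acc L =>
    dims.foldl (fun acc W =>
      dims.foldl (fun acc H =>
        if max_h < H then acc
        else if is_prime (L * W * H) then acc ++ [[L, W, H, L * W * H]] else acc) acc) acc) []

-- ===== PORT B =====
-- n >= 2 and all(n % d for d in range(2, isqrt(n) + 1))
def is_prime_alt (n : Int) : Bool :=
  decide (2 ≤ n) && (PySem.List.pyRange 2 (pyIsqrt n + 1) 1).all (fun d => !(PySem.Int.mod n d == 0))

def scan_rectangular_prisms_alt (prime_limit : Int) (max_h : Int) (allow_one : Bool) : List (List Int) :=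
  if !allow_one then []
  else
    let ps := (PySem.List.pyRange 2 (prime_limit + 1) 1).filter (fun n => is_prime_alt n)
    let hits := (ps.filter (fun p => decide (p ≤ max_h))).map (fun p => [1, 1, p, p])
    if 1 ≤ max_h then
      hits ++ ps.map (fun p => [1, p, 1, p]) ++ ps.map (fun p => [p, 1, 1, p])
    else hits

-- ===== PRECONDITION & SPEC =====
def Spec_scan_rectangular_prisms (prime_limit : Int) (max_h : Int) (allow_one : Bool) (out : List (List Int)) : Prop := out = scan_rectangular_prisms_alt prime_limit max_h allow_one
instance (prime_limit : Int) (max_h : Int) (allow_one : Bool) (out : List (List Int)) : Decidable (Spec_scan_rectangular_prisms prime_limit max_h allow_one out) := by unfold Spec_scan_rectangular_prisms; infer_instance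

-- ===== CLAIM (what is proved, stated in full; the proofs are below) =====
def Claim_equal_scan_rectangular_prisms : Prop := ∀ (prime_limit : Int) (max_h : Int) (allow_one : Bool), Dom_scan_rectangular_prisms prime_limit max_h allow_one → Spec_scan_rectangular_prisms prime_limit max_h allow_one (scan_rectangular_prisms prime_limit max_h allow_one)

-- ===== LEMMAS AND PROOFS =====

-- "n has no divisor in [2, isqrt n]" — the condition both primality tests decide
def NoDiv (n : Int) : Prop := ∀ d : Int, 2 ≤ d → d ≤ pyIsqrt n → PySem.Int.mod n d ≠ 0

lemma le_pyIsqrt {c n : Int} (hc : 0 ≤ c) (h : c * c ≤ n) : c ≤ pyIsqrt n := by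
  have hn : 0 ≤ n := le_trans (mul_nonneg hc hc) h
  have hcn : ((c.toNat : Int)) = c := Int.toNat_of_nonneg hc
  have hnn : ((n.toNat : Int)) = n := Int.toNat_of_nonneg hn
  have h' : c.toNat * c.toNat ≤ n.toNat := by
    have : ((c.toNat * c.toNat : Nat) : Int) ≤ ((n.toNat : Nat) : Int) := by push_cast [hcn, hnn]; exact h
    exact_mod_cast this
  have := Nat.le_sqrt.mpr h'
  unfold pyIsqrt
  omega

lemma isPrimeLoop_false (n r : Int) (k : Nat) :
    ∀ f, f + 2 * (k : Int) ≤ r → PySem.Int.mod n (f + 2 * (k : Int)) = 0 → isPrimeLoop n r f = false := by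
  induction k with
  | zero =>
    intro f h1 h2
    simp only [Nat.cast_zero, mul_zero, add_zero] at h1 h2
    unfold isPrimeLoop
    rw [dif_pos h1, if_pos h2]
  | succ k ih =>
    intro f h1 h2
    have hfr : f ≤ r := by push_cast at h1; omega
    unfold isPrimeLoop
    rw [dif_pos hfr]
    by_cases hm : PySem.Int.mod n f = 0
    · rw [if_pos hm]
    · rw [if_neg hm]
      apply ih (f + 2)
      · push_cast at h1 ⊢; omega
      · have : f + 2 + 2 * (k : Int) = f + 2 * ((k : Int) + 1) := by ring
        push_cast at h2 ⊢
        rw [show f + 2 + 2 * (k : Int) = f + 2 * ((k : Int) + 1) by ring]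
        exact h2

lemma isPrimeLoop_true (n r : Int) (m : Nat) :
    ∀ f, (r + 2 - f).toNat ≤ m → (∀ k : Nat, f + 2 * (k : Int) ≤ r → PySem.Int.mod n (f + 2 * (k : Int)) ≠ 0) →
      isPrimeLoop n r f = true := by
  induction m with
  | zero =>
    intro f hm _
    unfold isPrimeLoop
    rw [dif_neg (by omega)]
  | succ m ih =>
    intro f hm h
    unfold isPrimeLoop
    by_cases hfr : f ≤ r
    · rw [dif_pos hfr, if_neg (by simpa using h 0 (by simpa using hfr))]
      apply ih (f + 2) (by omega)
      intro k hk
      have h1 : f + 2 + 2 * (k : Int) = f + 2 * (((k + 1 : Nat)) : Int) := by push_cast; ring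
      rw [h1] at hk ⊢
      exact h (k + 1) hk
    · rw [dif_neg hfr]

lemma pyIsqrt_lt {c n : Int} (hc : 0 < c) (h : n < c * c) : pyIsqrt n < c := by
  unfold pyIsqrt
  have hcn : ((c.toNat : Int)) = c := Int.toNat_of_nonneg hc.le
  have h' : n.toNat < c.toNat * c.toNat := by
    by_cases hn : 0 ≤ n
    · have hnn : ((n.toNat : Int)) = n := Int.toNat_of_nonneg hn
      have : ((n.toNat : Nat) : Int) < ((c.toNat * c.toNat : Nat) : Int) := by push_cast [hcn, hnn]; exact h
      exact_mod_cast this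
    · have h2 : n.toNat = 0 := by omega
      rw [h2]
      have h3 : 1 ≤ c.toNat := by omega
      nlinarith
  have := Nat.sqrt_lt.mpr h'
  omega

lemma is_prime_iff (n : Int) : is_prime n = true ↔ 2 ≤ n ∧ NoDiv n := by
  unfold is_prime
  by_cases h1 : n ≤ 1
  · rw [if_pos h1]
    constructor
    · intro h; exact absurd h (by simp)
    · rintro ⟨h, _⟩; exact absurd h (by omega)
  · rw [if_neg h1]
    by_cases h2 : n ≤ 3
    · rw [if_pos h2]
      simp only [true_iff]
      refine ⟨by omega, ?_⟩
      intro d hd hdr _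
      have : pyIsqrt n < 2 := pyIsqrt_lt (by norm_num) (by omega)
      omega
    · rw [if_neg h2]
      by_cases h3 : PySem.Int.mod n 2 = 0
      · rw [if_pos h3]
        simp only [decide_eq_true_eq]
        constructor
        · intro h; omega
        · rintro ⟨_, hnd⟩
          exact absurd h3 (hnd 2 le_rfl (le_pyIsqrt (by omega) (by omega)))
      · rw [if_neg h3]
        constructor
        · intro hloop
          refine ⟨by omega, ?_⟩
          intro d hd hdr hmd
          have hdvd : d ∣ n := (PySem.Int.mod_eq_zero_iff_dvd n d).mp hmd
          have hdodd : d % 2 = 1 := by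
            rcases PySem.Int.mod_two_eq d with he | ho
            · exfalso
              have h2d : (2 : Int) ∣ d := by
                rw [PySem.Int.mod_eq_emod_of_pos (by norm_num)] at he
                exact Int.dvd_of_emod_eq_zero he
              exact h3 ((PySem.Int.mod_eq_zero_iff_dvd n 2).mpr (dvd_trans h2d hdvd))
            · rw [PySem.Int.mod_eq_emod_of_pos (by norm_num)] at ho
              exact ho
          have hd3 : 3 ≤ d := by omega
          obtain ⟨k, hk⟩ : ∃ k : Nat, d = 3 + 2 * (k : Int) := ⟨((d - 3).toNat) / 2, by omega⟩
          have := isPrimeLoop_false n (pyIsqrt n) k 3 (by omega) (by rw [show (3 : Int) + 2 * (k : Int) = d by omega]; exact hmd)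
          rw [hloop] at this
          exact Bool.true_eq_false.mp this
        · rintro ⟨_, hnd⟩
          apply isPrimeLoop_true n (pyIsqrt n) ((pyIsqrt n + 2 - 3).toNat) 3 le_rfl
          intro k hk
          exact hnd (3 + 2 * (k : Int)) (by omega) hk

lemma is_prime_alt_iff (n : Int) : is_prime_alt n = true ↔ 2 ≤ n ∧ NoDiv n := by
  unfold is_prime_alt NoDiv
  simp only [Bool.and_eq_true, decide_eq_true_eq, List.all_eq_true, PySem.List.mem_pyRange_one,
    Bool.not_eq_eq_eq_not, Bool.not_true, beq_eq_false_iff_ne, ne_eq]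
  constructor
  · rintro ⟨h1, h2⟩
    exact ⟨h1, fun d hd hdr => h2 d ⟨hd, by omega⟩⟩
  · rintro ⟨h1, h2⟩
    exact ⟨h1, fun d ⟨hd, hdr⟩ => h2 d hd (by omega)⟩

lemma prime_eq (n : Int) : is_prime n = is_prime_alt n := by
  rcases hb : is_prime_alt n with _ | _
  · rcases ha : is_prime n with _ | _
    · rfl
    · exact absurd ((is_prime_alt_iff n).mpr ((is_prime_iff n).mp ha)) (by simp [hb])
  · exact (is_prime_iff n).mpr ((is_prime_alt_iff n).mp hb)

lemma is_prime_mul_false {a b : Int} (ha : 2 ≤ a) (hb : 2 ≤ b) : is_prime (a * b) = false := by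
  rcases hv : is_prime (a * b) with _ | _
  · rfl
  · exfalso
    obtain ⟨_, hnd⟩ := (is_prime_iff (a * b)).mp hv
    rcases le_total a b with hab | hab
    · exact hnd a ha (le_pyIsqrt (by omega) (by nlinarith)) ((PySem.Int.mod_eq_zero_iff_dvd _ a).mpr (dvd_mul_right a b))
    · exact hnd b hb (le_pyIsqrt (by omega) (by nlinarith)) ((PySem.Int.mod_eq_zero_iff_dvd _ b).mpr (dvd_mul_left b a))

lemma mem_primes_up_to {pl p : Int} (h : p ∈ primes_up_to pl) : is_prime p = true ∧ 2 ≤ p := by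
  unfold primes_up_to at h
  rw [List.mem_filter] at h
  exact ⟨h.2, (PySem.List.mem_pyRange_one.mp h.1).1⟩

-- a loop body of the form 'acc := acc ++ (emitted chunk)' is the flatMap of its chunks
lemma foldl_emit {α β : Type} (l : List α) (f : List β → α → List β) (g : α → List β)
    (hg : ∀ (acc : List β) (x : α), x ∈ l → f acc x = acc ++ g x) (acc : List β) :
    l.foldl f acc = acc ++ l.flatMap g := by
  rw [PySem.List.foldl_congr_mem l f (fun acc x => acc ++ g x) acc (fun acc x hx => hg acc x hx)]
  exact PySem.List.foldl_append_eq_flatMap g l acc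

-- a cons-headed loop: the head's chunk, then the flatMap of the tail's chunks
lemma foldl_cons_emit {α β : Type} (x : α) (l : List α) (f : List β → α → List β)
    (e0 : List β) (g : α → List β)
    (h0 : ∀ acc, f acc x = acc ++ e0)
    (hg : ∀ (acc : List β) (y : α), y ∈ l → f acc y = acc ++ g y) (acc : List β) :
    (x :: l).foldl f acc = acc ++ (e0 ++ l.flatMap g) := by
  rw [List.foldl_cons, h0 acc, foldl_emit l f g hg, List.append_assoc]

lemma scan_eq (pl mh : Int) (ao : Bool) :
    scan_rectangular_prisms pl mh ao = scan_rectangular_prisms_alt pl mh ao := by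
  have hps : (PySem.List.pyRange 2 (pl + 1) 1).filter (fun n => is_prime_alt n) = primes_up_to pl := by
    unfold primes_up_to
    exact List.filter_congr (fun x _ => (prime_eq x).symm)
  have hmem : ∀ p ∈ primes_up_to pl, is_prime p = true ∧ 2 ≤ p := fun p hp => mem_primes_up_to hp
  set ps := primes_up_to pl with hpsdef
  have hcomp2 : ∀ p q : Int, 2 ≤ p → 2 ≤ q → is_prime (p * q) = false :=
    fun p q hp hq => is_prime_mul_false hp hq
  cases ao with
  | false =>
    simp only [scan_rectangular_prisms, scan_rectangular_prisms_alt, Bool.not_false, if_true,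
      Bool.false_eq_true, if_false, List.nil_append, ← hpsdef]
    -- every triple of primes has a composite product: nothing is ever appended
    have h3 : ∀ L W : Int, 2 ≤ L → 2 ≤ W → ∀ acc : List (List Int),
        ps.foldl (fun acc H => if mh < H then acc
          else if is_prime (L * W * H) then acc ++ [[L, W, H, L * W * H]] else acc) acc = acc := by
      intro L W hL hW acc
      rw [foldl_emit ps _ (fun _ => []) ?_ acc]
      · simp
      · intro acc' H hH
        have hcH : is_prime (L * W * H) = false := hcomp2 (L * W) H (by nlinarith) (hmem H hH).2
        by_cases hc : mh < H
        · simp [hc]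
        · simp [hc, hcH]
    have h2 : ∀ L : Int, 2 ≤ L → ∀ acc : List (List Int),
        ps.foldl (fun acc W => ps.foldl (fun acc H => if mh < H then acc
          else if is_prime (L * W * H) then acc ++ [[L, W, H, L * W * H]] else acc) acc) acc = acc := by
      intro L hL acc
      rw [foldl_emit ps _ (fun _ => []) ?_ acc]
      · simp
      · intro acc' W hW
        rw [h3 L W hL (hmem W hW).2 acc']
        simp
    rw [foldl_emit ps _ (fun _ => []) ?_ []]
    · simp
    · intro acc' L hL
      rw [h2 L (hmem L hL).2 acc']
      simp
  | true =>
    simp only [scan_rectangular_prisms, scan_rectangular_prisms_alt, Bool.not_true,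
      Bool.false_eq_true, if_false, reduceIte, List.singleton_append, ← hpsdef, hps]
    have hp1 : is_prime (1:Int) = false := by norm_num [is_prime]
    -- H-loop for L = W = 1: one hit per prime H ≤ max_h
    have hH11 : ∀ acc : List (List Int),
        (1 :: ps).foldl (fun acc H => if mh < H then acc
          else if is_prime (1 * 1 * H) then acc ++ [[1, 1, H, 1 * 1 * H]] else acc) acc =
        acc ++ (ps.filter (fun p => decide (p ≤ mh))).map (fun p => [1, 1, p, p]) := by
      intro acc
      simp only [List.foldl_cons]
      have h1 : (if mh < (1:Int) then acc
          else if is_prime ((1:Int) * 1 * 1) = true then acc ++ [[1, 1, 1, (1:Int) * 1 * 1]] else acc) = acc := by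
        by_cases hc : mh < (1:Int) <;> simp [hc, hp1]
      rw [h1, PySem.List.foldl_congr_mem ps _
        (fun acc H => if decide (H ≤ mh) = true then acc ++ [[1, 1, H, H]] else acc) acc ?_]
      · exact PySem.List.foldl_append_if _ _ ps acc
      · intro acc' H hH
        obtain ⟨hpH, h2H⟩ := hmem H hH
        by_cases hc : mh < H
        · simp [hc, show ¬ (H ≤ mh) by omega]
        · simp [hc, show H ≤ mh by omega, one_mul, hpH]
    -- H-loop for L = 1, W = p prime: only H = 1 hits (if allowed by max_h)
    have hH1p : ∀ p : Int, is_prime p = true → 2 ≤ p → ∀ acc : List (List Int),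
        (1 :: ps).foldl (fun acc H => if mh < H then acc
          else if is_prime (1 * p * H) then acc ++ [[1, p, H, 1 * p * H]] else acc) acc =
        acc ++ (if 1 ≤ mh then [[1, p, 1, p]] else []) := by
      intro p hp h2p acc
      simp only [List.foldl_cons]
      rw [foldl_emit ps _ (fun _ => []) ?_ _]
      · by_cases hm : 1 ≤ mh
        · simp [show ¬ mh < (1:Int) by omega, hm, one_mul, mul_one, hp]
        · simp [show mh < (1:Int) by omega, hm]
      · intro acc' H hH
        have hcH : is_prime (p * H) = false := hcomp2 p H h2p (hmem H hH).2
        by_cases hc : mh < H <;> simp [hc, hcH]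
    -- H-loop for L = p prime, W = 1: only H = 1 hits (if allowed by max_h)
    have hHp1 : ∀ p : Int, is_prime p = true → 2 ≤ p → ∀ acc : List (List Int),
        (1 :: ps).foldl (fun acc H => if mh < H then acc
          else if is_prime (p * 1 * H) then acc ++ [[p, 1, H, p * 1 * H]] else acc) acc =
        acc ++ (if 1 ≤ mh then [[p, 1, 1, p]] else []) := by
      intro p hp h2p acc
      simp only [List.foldl_cons]
      rw [foldl_emit ps _ (fun _ => []) ?_ _]
      · by_cases hm : 1 ≤ mh
        · simp [show ¬ mh < (1:Int) by omega, hm, mul_one, hp]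
        · simp [show mh < (1:Int) by omega, hm]
      · intro acc' H hH
        have hcH : is_prime (p * H) = false := hcomp2 p H h2p (hmem H hH).2
        by_cases hc : mh < H <;> simp [hc, hcH]
    -- H-loop for two prime dims: no hits at all
    have hHpq : ∀ p q : Int, 2 ≤ p → 2 ≤ q → ∀ acc : List (List Int),
        (1 :: ps).foldl (fun acc H => if mh < H then acc
          else if is_prime (p * q * H) then acc ++ [[p, q, H, p * q * H]] else acc) acc = acc := by
      intro p q h2p h2q acc
      rw [foldl_emit (1 :: ps) _ (fun _ => []) ?_ _]
      · simp
      · intro acc' H hH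
        rcases List.mem_cons.mp hH with h | h
        · subst h
          have hcH : is_prime (p * q) = false := hcomp2 p q h2p h2q
          by_cases hc : mh < (1:Int) <;> simp [hc, hcH]
        · have hcH : is_prime (p * q * H) = false := hcomp2 (p * q) H (by nlinarith) (hmem H h).2
          by_cases hc : mh < H <;> simp [hc, hcH]
    -- W-loop for L = 1
    have hW1 : ∀ acc : List (List Int),
        (1 :: ps).foldl (fun acc W => (1 :: ps).foldl (fun acc H => if mh < H then acc
          else if is_prime (1 * W * H) then acc ++ [[1, W, H, 1 * W * H]] else acc) acc) acc =
        acc ++ ((ps.filter (fun p => decide (p ≤ mh))).map (fun p => [1, 1, p, p]) ++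
          ps.flatMap (fun W => if 1 ≤ mh then [[1, W, 1, W]] else [])) :=
      fun acc => foldl_cons_emit 1 ps _ _ _
        (fun acc' => hH11 acc')
        (fun acc' W hW => hH1p W (hmem W hW).1 (hmem W hW).2 acc') acc
    -- W-loop for L = p prime
    have hWp : ∀ p : Int, is_prime p = true → 2 ≤ p → ∀ acc : List (List Int),
        (1 :: ps).foldl (fun acc W => (1 :: ps).foldl (fun acc H => if mh < H then acc
          else if is_prime (p * W * H) then acc ++ [[p, W, H, p * W * H]] else acc) acc) acc =
        acc ++ ((if 1 ≤ mh then [[p, 1, 1, p]] else []) ++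
          ps.flatMap (fun _ => [])) :=
      fun p hp h2p acc => foldl_cons_emit 1 ps _ _ _
        (fun acc' => hHp1 p hp h2p acc')
        (fun acc' W hW => by
          rw [hHpq p W h2p (hmem W hW).2 acc']
          simp) acc
    -- the whole L-loop
    rw [foldl_cons_emit 1 ps _ _
      (fun L => (if 1 ≤ mh then [[L, 1, 1, L]] else []) ++ ps.flatMap (fun _ => ([] : List (List Int))))
      (fun acc' => hW1 acc')
      (fun acc' L hL => hWp L (hmem L hL).1 (hmem L hL).2 acc') []]
    have hnil : ∀ l : List Int, l.flatMap (fun _ => ([] : List (List Int))) = [] := by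
      intro l
      induction l with
      | nil => rfl
      | cons a t ih => rw [List.flatMap_cons, ih]; rfl
    have hsingle : ∀ (l : List Int) (f : Int → List Int), l.flatMap (fun x => [f x]) = l.map f := by
      intro l f
      induction l with
      | nil => rfl
      | cons a t ih => rw [List.flatMap_cons, ih, List.map_cons, List.singleton_append]
    by_cases hm : 1 ≤ mh <;>
      simp only [hm, if_true, if_false, hnil, hsingle,
        List.nil_append, List.append_nil, List.append_assoc]
-- ===== VERDICT (by name: the statement is the Claim_ definition above) =====
theorem scan_rectangular_prisms_spec : Claim_equal_scan_rectangular_prisms := by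
  intro pl mh ao _
  unfold Spec_scan_rectangular_prisms
  exact scan_eq pl mh ao
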